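-- pv_equiv track=rewrite | github.com/JeongHooon-Lee/ps_python_rust | 2022_5/9627.py | solution
-- ===== SOURCE A (Python) =====
-- import math
--
-- def solution(x):
--     if x <= 0:
--         return 0
--
--     temp = int(math.log2(x))
--     pow2 = 2**temp
--     if pow2 == x:
--         return temp * x // 2 + 1
--
--     diff = x - pow2
--     return solution(pow2) + diff + solution(diff)
-- ===== SOURCE B (Python) =====
-- def solution(x):
--     # cumulative popcount of 1..x via a closed-form count per bit position
--     if x <= 0:
--         return 0
--     total = 0
--     for i in range(x.bit_length()):
--         half = 1 << i
--         full = half << 1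
--         total += (x + 1) // full * half + max(0, (x + 1) % full - half)
--     return total
-- ===== Notes on version B (the rewrite author's own statement) =====
-- stated objective: alternative
-- what changed: A strips the highest set bit recursively (with float log2); B makes one pass over bit positions, adding a closed-form count of integers in [1,x] with each bit set.
import Mathlib
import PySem

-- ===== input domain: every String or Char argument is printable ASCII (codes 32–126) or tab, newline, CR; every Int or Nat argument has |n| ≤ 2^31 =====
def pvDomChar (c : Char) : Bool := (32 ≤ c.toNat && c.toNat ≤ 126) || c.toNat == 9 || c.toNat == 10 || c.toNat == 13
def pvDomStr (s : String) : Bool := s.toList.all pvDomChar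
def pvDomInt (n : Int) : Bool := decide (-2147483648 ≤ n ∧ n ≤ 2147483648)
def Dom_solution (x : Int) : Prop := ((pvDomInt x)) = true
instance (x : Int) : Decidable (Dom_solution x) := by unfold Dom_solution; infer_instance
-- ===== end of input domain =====

-- B replaces A's recursive highest-bit stripping by a single loop over bit positions
-- with a closed-form count of set bits per position (objective: alternative).


-- ===== PORT A =====
-- After the x ≤ 0 guard all values are positive, so the recursion runs over Nat;
-- Python's `//` on nonnegative ints is Nat division.  `int(math.log2 x)` is the exact
-- floor of log2 on the domain (|x| ≤ 2^31 is exact in double precision), ported as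
-- Nat.log 2; `temp`/`pow2`/`diff` are inlined.
def solutionA_rec (n : Nat) : Nat :=
  if h0 : n = 0 then 0
  else if hp : 2 ^ Nat.log 2 n = n then Nat.log 2 n * n / 2 + 1
  else solutionA_rec (2 ^ Nat.log 2 n)
       + (n - 2 ^ Nat.log 2 n)
       + solutionA_rec (n - 2 ^ Nat.log 2 n)
termination_by n
decreasing_by
  · exact lt_of_le_of_ne (Nat.pow_log_le_self 2 h0) hp
  · have h1 : 1 ≤ 2 ^ Nat.log 2 n := Nat.one_le_two_pow
    omega

def solution (x : Int) : Int :=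
  if x ≤ 0 then 0 else (solutionA_rec x.toNat : Int)

-- ===== PORT B =====
-- Source B: loop i over range(x.bit_length()); for n ≥ 1, bit_length n = Nat.log 2 n + 1.
-- Nat subtraction realizes Python's max(0, (x+1) % full - half) exactly.
def solution_alt (x : Int) : Int :=
  if x ≤ 0 then 0
  else
    let n := x.toNat
    ((List.range (Nat.log 2 n + 1)).foldl
      (fun total i =>
        let half := 2 ^ i
        let full := 2 * half
        total + ((n + 1) / full * half + ((n + 1) % full - half))) 0 : Nat)

-- ===== PRECONDITION & SPEC =====
def Spec_solution (x : Int) (out : Int) : Prop := out = solution_alt x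
instance (x : Int) (out : Int) : Decidable (Spec_solution x out) := by unfold Spec_solution; infer_instance

-- ===== CLAIM (what is proved, stated in full; the proofs are below) =====
def Claim_equal_solution : Prop := ∀ (x : Int), Dom_solution x → Spec_solution x (solution x)

-- ===== LEMMAS AND PROOFS =====

/-- bit i of k -/
def bitv (i k : Nat) : Nat := k % (2 * 2 ^ i) / 2 ^ i

/-- number of integers in [1, n] having bit i set (B's closed form) -/
def cnt (i n : Nat) : Nat := (n + 1) / (2 * 2 ^ i) * 2 ^ i + ((n + 1) % (2 * 2 ^ i) - 2 ^ i)

/-- popcount -/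
def pc (n : Nat) : Nat :=
  if h : n = 0 then 0 else pc (n / 2) + n % 2
decreasing_by exact Nat.div_lt_self (Nat.pos_of_ne_zero h) (by norm_num)

/-- cumulative popcount of 0..n -/
def S (n : Nat) : Nat := ∑ k ∈ Finset.range (n + 1), pc k

lemma pc_zero : pc 0 = 0 := by rw [pc]; rfl

lemma pc_rec (n : Nat) : pc n = pc (n / 2) + n % 2 := by
  by_cases h : n = 0
  · subst h; rw [pc_zero]
  · rw [pc, dif_neg h]

lemma pc_one : pc 1 = 1 := by rw [pc_rec]; norm_num [pc_zero]

lemma bitv_lt (i k : Nat) (h : k < 2 ^ i) : bitv i k = 0 := by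
  have h1 : 1 ≤ 2 ^ i := Nat.one_le_two_pow
  have hm : k % (2 * 2 ^ i) = k := Nat.mod_eq_of_lt (by omega)
  rw [bitv, hm, Nat.div_eq_of_lt h]

lemma bitv_zero (i : Nat) : bitv i 0 = 0 := bitv_lt i 0 Nat.one_le_two_pow

lemma bitv_zero_bit (k : Nat) : bitv 0 k = k % 2 := by
  simp [bitv]

lemma bitv_succ (i k : Nat) : bitv (i + 1) k = bitv i (k / 2) := by
  have e1 : k / 2 % (2 * 2 ^ i) = k % (2 * (2 * 2 ^ i)) / 2 :=
    (Nat.mod_mul_right_div_self k 2 (2 * 2 ^ i)).symm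
  have e2 : 2 * (2 * 2 ^ i) = 2 * 2 ^ (i + 1) := by ring
  rw [bitv, bitv, e1, e2, Nat.div_div_eq_div_mul, pow_succ]
  ring_nf

lemma pc_eq_sum_bits : ∀ L k, k < 2 ^ L → pc k = ∑ i ∈ Finset.range L, bitv i k := by
  intro L
  induction L with
  | zero => intro k hk; interval_cases k; simp [pc_zero]
  | succ L ih =>
    intro k hk
    have hk2 : k / 2 < 2 ^ L := by rw [pow_succ] at hk; omega
    rw [Finset.sum_range_succ']
    have hb : ∀ i ∈ Finset.range L, bitv (i + 1) k = bitv i (k / 2) := fun i _ => bitv_succ i k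
    rw [Finset.sum_congr rfl hb, ← ih (k / 2) hk2, bitv_zero_bit, pc_rec k]

lemma cnt_zero (i : Nat) : cnt i 0 = 0 := by
  have h1 : 1 ≤ 2 ^ i := Nat.one_le_two_pow
  have d0 : (1 : Nat) / (2 * 2 ^ i) = 0 := Nat.div_eq_of_lt (by omega)
  have m0 : (1 : Nat) % (2 * 2 ^ i) = 1 := Nat.mod_eq_of_lt (by omega)
  rw [cnt, d0, m0]
  omega

/-- the closed-form per-bit count grows by exactly the bit of n+1 -/
lemma cnt_step (h n : Nat) (h1 : 1 ≤ h) :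
    (n + 2) / (2 * h) * h + ((n + 2) % (2 * h) - h)
      = (n + 1) / (2 * h) * h + ((n + 1) % (2 * h) - h) + (n + 1) % (2 * h) / h := by
  have hMpos : 0 < 2 * h := by omega
  have hdm := Nat.div_add_mod (n + 1) (2 * h)
  set q := (n + 1) / (2 * h) with hq
  set r := (n + 1) % (2 * h) with hr
  have hrlt : r < 2 * h := Nat.mod_lt _ hMpos
  have hn2 : n + 2 = 2 * h * q + (r + 1) := by omega
  by_cases hcase : r + 1 < 2 * h
  · have hd : (n + 2) / (2 * h) = q := by
      rw [hn2, Nat.mul_add_div hMpos, Nat.div_eq_of_lt hcase]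
      omega
    have hm : (n + 2) % (2 * h) = r + 1 := by
      rw [hn2, Nat.mul_add_mod, Nat.mod_eq_of_lt hcase]
    rw [hd, hm]
    by_cases hrh : r < h
    · rw [Nat.div_eq_of_lt hrh]; omega
    · have : r / h = 1 := Nat.div_eq_of_lt_le (by omega) (by omega)
      rw [this]; omega
  · have hmul : 2 * h * (q + 1) = 2 * h * q + 2 * h := by ring
    have hn2' : n + 2 = 2 * h * (q + 1) := by omega
    have hd : (n + 2) / (2 * h) = q + 1 := by
      rw [hn2', Nat.mul_div_cancel_left _ hMpos]
    have hm : (n + 2) % (2 * h) = 0 := by rw [hn2', Nat.mul_mod_right]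
    have hrh : r / h = 1 := Nat.div_eq_of_lt_le (by omega) (by omega)
    rw [hd, hm, hrh]
    have : (q + 1) * h = q * h + h := by ring
    omega

lemma cnt_succ (i n : Nat) : cnt i (n + 1) = cnt i n + bitv i (n + 1) := by
  have := cnt_step (2 ^ i) n Nat.one_le_two_pow
  rw [cnt, cnt, bitv]
  omega

lemma cnt_eq_sum (i n : Nat) : cnt i n = ∑ k ∈ Finset.range (n + 1), bitv i k := by
  induction n with
  | zero => simp [cnt_zero, bitv_zero]
  | succ n ih => rw [cnt_succ, Finset.sum_range_succ, ih]

lemma foldl_add_eq_sum (f : Nat → Nat) (L : Nat) :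
    ∀ a, (List.range L).foldl (fun t i => t + f i) a = a + ∑ i ∈ Finset.range L, f i := by
  induction L with
  | zero => simp
  | succ L ih =>
    intro a
    rw [List.range_succ, List.foldl_append, ih, Finset.sum_range_succ]
    simp [Nat.add_assoc]

lemma alt_eq_S (n : Nat) : (List.range (Nat.log 2 n + 1)).foldl
      (fun total i =>
        let half := 2 ^ i
        let full := 2 * half
        total + ((n + 1) / full * half + ((n + 1) % full - half))) 0 = S n := by
  have hbody : (List.range (Nat.log 2 n + 1)).foldl
      (fun total i =>
        let half := 2 ^ i
        let full := 2 * half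
        total + ((n + 1) / full * half + ((n + 1) % full - half))) 0
      = (List.range (Nat.log 2 n + 1)).foldl (fun t i => t + cnt i n) 0 := rfl
  rw [hbody, foldl_add_eq_sum, Nat.zero_add]
  have hs : ∀ i ∈ Finset.range (Nat.log 2 n + 1), cnt i n = ∑ k ∈ Finset.range (n + 1), bitv i k :=
    fun i _ => cnt_eq_sum i n
  rw [Finset.sum_congr rfl hs, Finset.sum_comm]
  refine Finset.sum_congr rfl (fun k hk => ?_)
  have hk' : k < 2 ^ (Nat.log 2 n + 1) := by
    have h1 : n < 2 ^ (Nat.log 2 n + 1) := Nat.lt_pow_succ_log_self (by norm_num) n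
    have : k < n + 1 := Finset.mem_range.mp hk
    omega
  exact (pc_eq_sum_bits _ k hk').symm

lemma pc_two_pow_add : ∀ t k, k < 2 ^ t → pc (2 ^ t + k) = pc k + 1 := by
  intro t
  induction t with
  | zero =>
    intro k hk; interval_cases k
    rw [pow_zero, pc_one, pc_zero]
  | succ t ih =>
    intro k hk
    have e : (2 ^ (t + 1) + k) / 2 = 2 ^ t + k / 2 := by rw [pow_succ]; omega
    have em : (2 ^ (t + 1) + k) % 2 = k % 2 := by rw [pow_succ]; omega
    have hk2 : k / 2 < 2 ^ t := by rw [pow_succ] at hk; omega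
    rw [pc_rec (2 ^ (t + 1) + k), e, em, ih (k / 2) hk2, pc_rec k]
    ring

lemma pc_two_pow (t : Nat) : pc (2 ^ t) = 1 := by
  have h := pc_two_pow_add t 0 Nat.one_le_two_pow
  rw [Nat.add_zero, pc_zero] at h
  omega

lemma S_succ (n : Nat) : S (n + 1) = S n + pc (n + 1) := Finset.sum_range_succ _ _

lemma S_zero : S 0 = 0 := by simp [S, pc_zero]

lemma S_add (t : Nat) : ∀ d, d < 2 ^ t → S (2 ^ t + d) = S (2 ^ t) + d + S d := by
  intro d
  induction d with
  | zero => intro _; rw [Nat.add_zero, S_zero]; omega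
  | succ d ih =>
    intro hd
    have hpc := pc_two_pow_add t (d + 1) hd
    rw [show 2 ^ t + (d + 1) = (2 ^ t + d) + 1 from by omega, S_succ,
        ih (by omega), show 2 ^ t + d + 1 = 2 ^ t + (d + 1) from by omega, hpc, S_succ]
    omega

lemma S_pow (t : Nat) : 2 * S (2 ^ t) = t * 2 ^ t + 2 := by
  induction t with
  | zero =>
    rw [pow_zero, show S 1 = S 0 + pc 1 from S_succ 0, S_zero, pc_one]
    norm_num
  | succ t ih =>
    have h1 : 1 ≤ 2 ^ t := Nat.one_le_two_pow
    have e1 : S (2 ^ t) = S (2 ^ t - 1) + 1 := by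
      have h2 : 2 ^ t = (2 ^ t - 1) + 1 := by omega
      rw [h2, S_succ, ← h2, pc_two_pow]
    have e2 : 2 ^ (t + 1) = (2 ^ t + (2 ^ t - 1)) + 1 := by rw [pow_succ]; omega
    have e3 : S (2 ^ (t + 1)) = S (2 ^ t) + (2 ^ t - 1) + S (2 ^ t - 1) + 1 := by
      rw [e2, S_succ, ← e2, pc_two_pow, S_add t (2 ^ t - 1) (by omega)]
    have hp : 2 ^ (t + 1) = 2 * 2 ^ t := by rw [pow_succ]; ring
    have hmul : (t + 1) * 2 ^ (t + 1) = 2 * (t * 2 ^ t) + 2 * 2 ^ t := by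
      rw [hp]; ring
    omega

lemma solutionA_eq_S : ∀ n, solutionA_rec n = S n := by
  intro n
  induction n using solutionA_rec.induct with
  | case1 =>
    rw [solutionA_rec, S_zero]
    rfl
  | case2 n h0 hp =>
    rw [solutionA_rec, dif_neg h0, dif_pos hp]
    have hs := S_pow (Nat.log 2 n)
    rw [hp] at hs
    omega
  | case3 n h0 hp ih1 ih2 =>
    rw [solutionA_rec, dif_neg h0, dif_neg hp, ih1, ih2]
    have hle : 2 ^ Nat.log 2 n ≤ n := Nat.pow_log_le_self 2 h0
    have hlt : n < 2 ^ (Nat.log 2 n + 1) := Nat.lt_pow_succ_log_self (by norm_num) n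
    have hd : n - 2 ^ Nat.log 2 n < 2 ^ Nat.log 2 n := by rw [pow_succ] at hlt; omega
    have hadd := S_add (Nat.log 2 n) (n - 2 ^ Nat.log 2 n) hd
    rw [show 2 ^ Nat.log 2 n + (n - 2 ^ Nat.log 2 n) = n from by omega] at hadd
    omega

-- ===== VERDICT (by name: the statement is the Claim_ definition above) =====
theorem solution_spec : Claim_equal_solution := by
  intro x _
  unfold Spec_solution solution solution_alt
  by_cases hx : x ≤ 0
  · simp [hx]
  · simp only [if_neg hx]
    rw [solutionA_eq_S, ← alt_eq_S x.toNat]
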